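-- pv_equiv track=rewrite | github.com/skylooop/Polyomino_tiling | preprocessing.py | adj_matrix
-- ===== SOURCE A (Python) =====
-- def adj_matrix(M1, M2, R_poly, L_poly):
--     conf, num = {}, 0
--     for i in R_poly:
--         next = len(conf)
--         adj_ma = {x + next: num for x in range((M1 - i[0][0] + 1) * (M2 - i[0][1] + 1))}
--         conf.update(adj_ma)
--         if i[0][0] == i[0][1]:
--             num += 1
--             continue
--         else:
--             next = len(conf)
--             adj_ma = {x + next: num for x in range((M1 - i[0][1] + 1) * (M2 - i[0][0] + 1))}
--             conf.update(adj_ma)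
--             num += 1
--     for j in L_poly:
--         next = len(conf)
--         adj_ma = {x + next: num for x in range((M1 - j[0][0] + 1) * (M2 - j[0][1] + 1) * 2)}
--         conf.update(adj_ma)
--         next = len(conf)
--         adj_ma = {x + next: num for x in range((M1 - j[0][1] + 1) * (M2 - j[0][0] + 1) * 2)}
--         conf.update(adj_ma)
--         num += 1
--     return conf
-- ===== SOURCE B (Python) =====
-- def adj_matrix(M1, M2, R_poly, L_poly):
--     # Pass 1: cumulative group boundaries (one entry per configuration group).
--     cuts, total = [], 0
--     for i in R_poly:
--         a, b = i[0]
--         total += max((M1 - a + 1) * (M2 - b + 1), 0)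
--         if a != b:
--             total += max((M1 - b + 1) * (M2 - a + 1), 0)
--         cuts.append(total)
--     for j in L_poly:
--         a, b = j[0]
--         total += max((M1 - a + 1) * (M2 - b + 1) * 2, 0)
--         total += max((M1 - b + 1) * (M2 - a + 1) * 2, 0)
--         cuts.append(total)
--     # Pass 2: label each cell index by binary-searching the boundary list.
--     out = {}
--     for k in range(total):
--         lo, hi = 0, len(cuts)
--         while lo < hi:
--             mid = (lo + hi) // 2
--             if cuts[mid] <= k:
--                 lo = mid + 1
--             else:
--                 hi = mid
--         out[k] = lo
--     return out
-- ===== Notes on version B (the rewrite author's own statement) =====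
-- stated objective: alternative
-- what changed: Instead of emitting each group's cells blockwise into the dict with len(conf)-based key offsets, B first computes only the cumulative group boundaries (one number per group), then labels every cell index 0..total-1 by binary-searching the boundary list.
import Mathlib
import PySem

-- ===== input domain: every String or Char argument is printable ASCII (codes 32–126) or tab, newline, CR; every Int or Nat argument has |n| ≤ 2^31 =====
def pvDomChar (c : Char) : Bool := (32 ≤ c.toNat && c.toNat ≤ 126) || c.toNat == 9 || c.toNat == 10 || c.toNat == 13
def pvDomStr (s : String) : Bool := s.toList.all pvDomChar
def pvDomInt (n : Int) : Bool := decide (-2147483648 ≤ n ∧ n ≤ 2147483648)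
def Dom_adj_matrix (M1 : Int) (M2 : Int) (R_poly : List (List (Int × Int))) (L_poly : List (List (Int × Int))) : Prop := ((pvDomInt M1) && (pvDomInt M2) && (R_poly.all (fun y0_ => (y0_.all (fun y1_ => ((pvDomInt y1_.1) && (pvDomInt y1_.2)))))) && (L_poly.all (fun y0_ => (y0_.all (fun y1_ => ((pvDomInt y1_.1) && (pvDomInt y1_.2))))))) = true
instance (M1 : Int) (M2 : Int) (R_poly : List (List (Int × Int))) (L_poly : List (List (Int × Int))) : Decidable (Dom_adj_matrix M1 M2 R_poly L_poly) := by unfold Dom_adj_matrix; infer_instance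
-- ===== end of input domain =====

-- B replaces A's blockwise dict filling (key offsets read off len(conf)) by two passes:
-- it first accumulates only the cumulative group boundaries, then labels each cell index
-- 0..total-1 by binary search over that boundary list (alternative algorithm, same result).

-- ===== PORT A =====
-- body of A's first loop (over R_poly)
def pvAstepR (M1 M2 : Int) (st : PySem.Dict Int Int × Int) (i : List (Int × Int)) : PySem.Dict Int Int × Int :=
  let conf := st.1
  let num := st.2
  let h := PySem.List.pyGetD i 0 ((0 : Int), (0 : Int))   -- i[0]; Pre_ excludes empty i
  let next : Int := (conf.size : Int)
  let adj_ma := (PySem.List.pyRange 0 ((M1 - h.1 + 1) * (M2 - h.2 + 1)) 1).foldl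
      (fun d x => d.insert (x + next) num) PySem.Dict.empty
  let conf := conf.update adj_ma.items
  if h.1 == h.2 then (conf, num + 1)
  else
    let next2 : Int := (conf.size : Int)
    let adj_ma2 := (PySem.List.pyRange 0 ((M1 - h.2 + 1) * (M2 - h.1 + 1)) 1).foldl
        (fun d x => d.insert (x + next2) num) PySem.Dict.empty
    (conf.update adj_ma2.items, num + 1)

-- body of A's second loop (over L_poly)
def pvAstepL (M1 M2 : Int) (st : PySem.Dict Int Int × Int) (j : List (Int × Int)) : PySem.Dict Int Int × Int :=
  let conf := st.1
  let num := st.2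
  let h := PySem.List.pyGetD j 0 ((0 : Int), (0 : Int))
  let next : Int := (conf.size : Int)
  let adj_ma := (PySem.List.pyRange 0 ((M1 - h.1 + 1) * (M2 - h.2 + 1) * 2) 1).foldl
      (fun d x => d.insert (x + next) num) PySem.Dict.empty
  let conf := conf.update adj_ma.items
  let next2 : Int := (conf.size : Int)
  let adj_ma2 := (PySem.List.pyRange 0 ((M1 - h.2 + 1) * (M2 - h.1 + 1) * 2) 1).foldl
      (fun d x => d.insert (x + next2) num) PySem.Dict.empty
  (conf.update adj_ma2.items, num + 1)

def adj_matrix (M1 : Int) (M2 : Int) (R_poly : List (List (Int × Int))) (L_poly : List (List (Int × Int))) : List (Int × Int) :=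
  let st := L_poly.foldl (pvAstepL M1 M2) (R_poly.foldl (pvAstepR M1 M2) (PySem.Dict.empty, 0))
  st.1.items

-- ===== PORT B =====
-- pass 1, body for R_poly: add the (clamped) group size(s) to the running total, append the boundary
def pvCutStepR (M1 M2 : Int) (st : List Int × Int) (i : List (Int × Int)) : List Int × Int :=
  let h := PySem.List.pyGetD i 0 ((0 : Int), (0 : Int))   -- i[0]; Pre_ excludes empty i
  let total := st.2 + max ((M1 - h.1 + 1) * (M2 - h.2 + 1)) 0
  let total := if h.1 ≠ h.2 then total + max ((M1 - h.2 + 1) * (M2 - h.1 + 1)) 0 else total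
  (st.1 ++ [total], total)

-- pass 1, body for L_poly
def pvCutStepL (M1 M2 : Int) (st : List Int × Int) (j : List (Int × Int)) : List Int × Int :=
  let h := PySem.List.pyGetD j 0 ((0 : Int), (0 : Int))
  let total := st.2 + max ((M1 - h.1 + 1) * (M2 - h.2 + 1) * 2) 0
  let total := total + max ((M1 - h.2 + 1) * (M2 - h.1 + 1) * 2) 0
  (st.1 ++ [total], total)

-- the while-loop binary search of Source B; lo, hi stay in [0, len(cuts)] so Nat with Nat-division
-- is exact for Python's nonnegative (lo+hi)//2, and cuts[mid] is always in range (default unused)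
def pvBsearch (cuts : List Int) (k : Int) (lo hi : Nat) : Nat :=
  if _h : lo < hi then
    let mid := (lo + hi) / 2
    if PySem.List.pyGetD cuts (mid : Int) 0 ≤ k then pvBsearch cuts k (mid + 1) hi
    else pvBsearch cuts k lo mid
  else lo
termination_by hi - lo
decreasing_by all_goals omega

def adj_matrix_alt (M1 : Int) (M2 : Int) (R_poly : List (List (Int × Int))) (L_poly : List (List (Int × Int))) : List (Int × Int) :=
  let st := L_poly.foldl (pvCutStepL M1 M2) (R_poly.foldl (pvCutStepR M1 M2) ([], 0))
  (PySem.List.pyRange 0 st.2 1).map (fun k => (k, (pvBsearch st.1 k 0 st.1.length : Int)))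

-- ===== PRECONDITION & SPEC =====
-- Pre_ excludes inputs with an empty inner list, on which Python A raises IndexError at i[0] (B raises there too).
def Pre_adj_matrix (M1 : Int) (M2 : Int) (R_poly : List (List (Int × Int))) (L_poly : List (List (Int × Int))) : Prop :=
  (∀ i ∈ R_poly, i ≠ []) ∧ (∀ j ∈ L_poly, j ≠ [])
instance (M1 : Int) (M2 : Int) (R_poly : List (List (Int × Int))) (L_poly : List (List (Int × Int))) : Decidable (Pre_adj_matrix M1 M2 R_poly L_poly) := by unfold Pre_adj_matrix; infer_instance
def pvWitness_adj_matrix : Int × Int × (List (List (Int × Int))) × (List (List (Int × Int))) := (2, 2, [[(1, 1)]], [[(1, 2)]])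

def Spec_adj_matrix (M1 : Int) (M2 : Int) (R_poly : List (List (Int × Int))) (L_poly : List (List (Int × Int))) (out : List (Int × Int)) : Prop := out = adj_matrix_alt M1 M2 R_poly L_poly
instance (M1 : Int) (M2 : Int) (R_poly : List (List (Int × Int))) (L_poly : List (List (Int × Int))) (out : List (Int × Int)) : Decidable (Spec_adj_matrix M1 M2 R_poly L_poly out) := by unfold Spec_adj_matrix; infer_instance

-- ===== CLAIM (what is proved, stated in full; the proofs are below) =====
def Claim_equal_adj_matrix : Prop := ∀ (M1 : Int) (M2 : Int) (R_poly : List (List (Int × Int))) (L_poly : List (List (Int × Int))), Dom_adj_matrix M1 M2 R_poly L_poly → Pre_adj_matrix M1 M2 R_poly L_poly → Spec_adj_matrix M1 M2 R_poly L_poly (adj_matrix M1 M2 R_poly L_poly)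

-- ===== LEMMAS AND PROOFS =====

-- proof-only ghost: the flat list of group labels, one entry per cell, as A lays the cells out
def pvGstepR (M1 M2 : Int) (st : List Int × Int) (i : List (Int × Int)) : List Int × Int :=
  let h := PySem.List.pyGetD i 0 ((0 : Int), (0 : Int))
  let labels := st.1 ++ List.replicate ((M1 - h.1 + 1) * (M2 - h.2 + 1)).toNat st.2
  let labels := if h.1 ≠ h.2 then labels ++ List.replicate ((M1 - h.2 + 1) * (M2 - h.1 + 1)).toNat st.2 else labels
  (labels, st.2 + 1)

def pvGstepL (M1 M2 : Int) (st : List Int × Int) (j : List (Int × Int)) : List Int × Int :=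
  let h := PySem.List.pyGetD j 0 ((0 : Int), (0 : Int))
  let labels := st.1 ++ List.replicate ((M1 - h.1 + 1) * (M2 - h.2 + 1) * 2).toNat st.2
  let labels := labels ++ List.replicate ((M1 - h.2 + 1) * (M2 - h.1 + 1) * 2).toNat st.2
  (labels, st.2 + 1)

-- ghost: the (clamped) number of cells each R- / L-piece contributes
def pvSzR (M1 M2 : Int) (i : List (Int × Int)) : Nat :=
  let h := PySem.List.pyGetD i 0 ((0 : Int), (0 : Int))
  ((M1 - h.1 + 1) * (M2 - h.2 + 1)).toNat +
    (if h.1 ≠ h.2 then ((M1 - h.2 + 1) * (M2 - h.1 + 1)).toNat else 0)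

def pvSzL (M1 M2 : Int) (j : List (Int × Int)) : Nat :=
  let h := PySem.List.pyGetD j 0 ((0 : Int), (0 : Int))
  ((M1 - h.1 + 1) * (M2 - h.2 + 1) * 2).toNat + ((M1 - h.2 + 1) * (M2 - h.1 + 1) * 2).toNat

-- ghost: cumulative boundaries / flat label list determined by the group sizes
def pvCutsOf : List Nat → Int → List Int
  | [], _ => []
  | s :: ss, t => (t + s) :: pvCutsOf ss (t + s)

def pvLabelsOf : List Nat → Int → List Int
  | [], _ => []
  | s :: ss, g => List.replicate s g ++ pvLabelsOf ss (g + 1)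

-- ===== A-side: A's dict is the enumeration of the ghost label list =====

-- enumerate of a replicated block is a shifted range paired with the constant value
lemma pv_enum_rep : ∀ (n : Nat) (a v : Int),
    PySem.List.enumerate (List.replicate n v) a
      = (PySem.List.pyRange 0 (n : Int) 1).map (fun x => (x + a, v)) := by
  intro n
  induction n with
  | zero => intro a v; simp [PySem.List.pyRange_one_eq_nil, PySem.List.enumerate_nil]
  | succ n ih =>
    intro a v
    rw [List.replicate_succ, PySem.List.enumerate_cons,
        PySem.List.pyRange_one_cons (by omega : (0:Int) < (n.succ : Int))]
    simp only [List.map_cons, Int.zero_add, ih]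
    congr 1
    rw [PySem.List.pyRange_one, PySem.List.pyRange_one]
    simp only [List.map_map]
    rw [show ((n.succ : Int) - 1).toNat = ((n : Int) - 0).toNat by omega]
    apply List.map_congr_left
    intro k _
    simp only [Function.comp_apply]
    congr 1
    omega

-- a range with an Int bound equals the range with the bound's toNat
lemma pv_range_toNat (c : Int) : PySem.List.pyRange 0 c 1 = PySem.List.pyRange 0 (c.toNat : Int) 1 := by
  rcases (by omega : 0 ≤ c ∨ c < 0) with h | h
  · rw [Int.toNat_of_nonneg h]
  · rw [PySem.List.pyRange_one_eq_nil (le_of_lt h), PySem.List.pyRange_one_eq_nil (by omega)]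

-- one of A's "conf.update(adj_ma)" blocks appends a replicated block to the enumerated label list
lemma pv_block (conf : PySem.Dict Int Int) (ls : List Int) (c num : Int)
    (hconf : conf.items = PySem.List.enumerate ls 0) :
    (conf.update (((PySem.List.pyRange 0 c 1).foldl
        (fun d x => d.insert (x + (conf.size : Int)) num) PySem.Dict.empty).items)).items
      = PySem.List.enumerate (ls ++ List.replicate c.toNat num) 0 := by
  have hsize : (conf.size : Int) = (ls.length : Int) := by
    have : conf.size = conf.items.length := rfl
    rw [this, hconf, PySem.List.length_enumerate]
  have hkeys : conf.keys = PySem.List.pyRange 0 (ls.length : Int) 1 := by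
    have : conf.keys = conf.items.map (·.1) := rfl
    rw [this, hconf, PySem.List.map_fst_enumerate]
    norm_num
  have hnodup : ((PySem.List.pyRange 0 c 1).map (fun x => x + (conf.size : Int))).Nodup :=
    (PySem.List.nodup_pyRange_one 0 c).map (fun a b hab => by omega)
  have h1 : (((PySem.List.pyRange 0 c 1).foldl
      (fun d x => d.insert (x + (conf.size : Int)) num) PySem.Dict.empty).items)
      = (PySem.List.pyRange 0 c 1).map (fun x => (x + (conf.size : Int), num)) := by
    rw [PySem.Dict.items_foldl_insert_fresh (PySem.List.pyRange 0 c 1)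
      (fun x => x + (conf.size : Int)) (fun _ => num) PySem.Dict.empty
      (fun a _ => by simp [PySem.Dict.contains_empty]) hnodup]
    rfl
  rw [h1]
  have hfresh : ∀ p ∈ (PySem.List.pyRange 0 c 1).map (fun x => (x + (conf.size : Int), num)),
      conf.contains p.1 = false := by
    intro p hp
    obtain ⟨x, hx, rfl⟩ := List.mem_map.mp hp
    have hx' := PySem.List.mem_pyRange_one.mp hx
    rw [PySem.Dict.contains_eq_decide_mem_keys, hkeys]
    simp only [decide_eq_false_iff_not, PySem.List.mem_pyRange_one]
    omega
  have hnodup2 : (((PySem.List.pyRange 0 c 1).map (fun x => (x + (conf.size : Int), num))).map Prod.fst).Nodup := by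
    rw [List.map_map]
    exact hnodup
  have h2 := PySem.Dict.items_foldl_insert_fresh
      ((PySem.List.pyRange 0 c 1).map (fun x => (x + (conf.size : Int), num)))
      Prod.fst Prod.snd conf hfresh hnodup2
  have hupd : conf.update ((PySem.List.pyRange 0 c 1).map (fun x => (x + (conf.size : Int), num)))
      = ((PySem.List.pyRange 0 c 1).map (fun x => (x + (conf.size : Int), num))).foldl
          (fun d a => d.insert a.1 a.2) conf := rfl
  rw [hupd, h2, hconf, PySem.List.enumerate_append, pv_enum_rep]
  congr 1
  rw [List.map_map, pv_range_toNat c]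
  apply List.map_congr_left
  intro x _
  simp only [Function.comp_apply]
  rw [hsize]
  congr 1
  omega

-- the body of A's R_poly loop preserves the relation with the ghost loop body
lemma pv_stepR (M1 M2 : Int) (stA : PySem.Dict Int Int × Int) (stB : List Int × Int)
    (i : List (Int × Int))
    (h1 : stA.1.items = PySem.List.enumerate stB.1 0) (h2 : stA.2 = stB.2) :
    (pvAstepR M1 M2 stA i).1.items = PySem.List.enumerate (pvGstepR M1 M2 stB i).1 0 ∧
    (pvAstepR M1 M2 stA i).2 = (pvGstepR M1 M2 stB i).2 := by
  obtain ⟨conf, num⟩ := stA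
  obtain ⟨ls, num'⟩ := stB
  simp only at h1 h2
  subst h2
  simp only [pvAstepR, pvGstepR]
  by_cases hc : (PySem.List.pyGetD i 0 ((0 : Int), (0 : Int))).1
      = (PySem.List.pyGetD i 0 ((0 : Int), (0 : Int))).2
  · simp only [hc, beq_self_eq_true, if_true, ne_eq, not_true_eq_false, if_false]
    exact ⟨pv_block conf ls _ num h1, trivial⟩
  · simp only [beq_iff_eq, hc, if_false, ne_eq, not_false_eq_true, if_true]
    have hb1 := pv_block conf ls ((M1 - (PySem.List.pyGetD i 0 ((0 : Int), (0 : Int))).1 + 1) *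
      (M2 - (PySem.List.pyGetD i 0 ((0 : Int), (0 : Int))).2 + 1)) num h1
    exact ⟨pv_block _ _ _ num hb1, trivial⟩

-- the body of A's L_poly loop preserves the relation with the ghost loop body
lemma pv_stepL (M1 M2 : Int) (stA : PySem.Dict Int Int × Int) (stB : List Int × Int)
    (j : List (Int × Int))
    (h1 : stA.1.items = PySem.List.enumerate stB.1 0) (h2 : stA.2 = stB.2) :
    (pvAstepL M1 M2 stA j).1.items = PySem.List.enumerate (pvGstepL M1 M2 stB j).1 0 ∧
    (pvAstepL M1 M2 stA j).2 = (pvGstepL M1 M2 stB j).2 := by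
  obtain ⟨conf, num⟩ := stA
  obtain ⟨ls, num'⟩ := stB
  simp only at h1 h2
  subst h2
  simp only [pvAstepL, pvGstepL]
  have hb1 := pv_block conf ls ((M1 - (PySem.List.pyGetD j 0 ((0 : Int), (0 : Int))).1 + 1) *
    (M2 - (PySem.List.pyGetD j 0 ((0 : Int), (0 : Int))).2 + 1) * 2) num h1
  exact ⟨pv_block _ _ _ num hb1, trivial⟩

-- folding a loop body that preserves the relation preserves it over the whole list
lemma pv_fold (stepA : PySem.Dict Int Int × Int → List (Int × Int) → PySem.Dict Int Int × Int)
    (stepB : List Int × Int → List (Int × Int) → List Int × Int)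
    (hstep : ∀ stA stB x, stA.1.items = PySem.List.enumerate stB.1 0 → stA.2 = stB.2 →
      (stepA stA x).1.items = PySem.List.enumerate (stepB stB x).1 0 ∧ (stepA stA x).2 = (stepB stB x).2) :
    ∀ (l : List (List (Int × Int))) (stA : PySem.Dict Int Int × Int) (stB : List Int × Int),
      stA.1.items = PySem.List.enumerate stB.1 0 → stA.2 = stB.2 →
      (l.foldl stepA stA).1.items = PySem.List.enumerate (l.foldl stepB stB).1 0 ∧
      (l.foldl stepA stA).2 = (l.foldl stepB stB).2 := by
  intro l
  induction l with
  | nil => intro stA stB h1 h2; exact ⟨h1, h2⟩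
  | cons x xs ih =>
    intro stA stB h1 h2
    obtain ⟨g1, g2⟩ := hstep stA stB x h1 h2
    exact ih (stepA stA x) (stepB stB x) g1 g2

-- ===== ghost fold = pvLabelsOf over the size list =====

lemma pv_gfoldR (M1 M2 : Int) : ∀ (R : List (List (Int × Int))) (ls : List Int) (g : Int),
    R.foldl (pvGstepR M1 M2) (ls, g)
      = (ls ++ pvLabelsOf (R.map (pvSzR M1 M2)) g, g + R.length) := by
  intro R
  induction R with
  | nil => intro ls g; simp [pvLabelsOf]
  | cons i rest ih =>
    intro ls g
    rw [List.foldl_cons, ih]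
    simp only [pvGstepR, pvSzR, pvLabelsOf, List.map_cons, List.length_cons, Prod.mk.injEq]
    refine ⟨?_, by push_cast; ring⟩
    split_ifs with h
    · rw [List.replicate_add]
      simp [List.append_assoc]
    · simp [List.append_assoc]

lemma pv_gfoldL (M1 M2 : Int) : ∀ (L : List (List (Int × Int))) (ls : List Int) (g : Int),
    L.foldl (pvGstepL M1 M2) (ls, g)
      = (ls ++ pvLabelsOf (L.map (pvSzL M1 M2)) g, g + L.length) := by
  intro L
  induction L with
  | nil => intro ls g; simp [pvLabelsOf]
  | cons j rest ih =>
    intro ls g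
    rw [List.foldl_cons, ih]
    simp only [pvGstepL, pvSzL, pvLabelsOf, List.map_cons, List.length_cons, Prod.mk.injEq]
    refine ⟨?_, by push_cast; ring⟩
    rw [List.replicate_add]
    simp [List.append_assoc]

lemma pv_labelsOf_append : ∀ (a b : List Nat) (g : Int),
    pvLabelsOf (a ++ b) g = pvLabelsOf a g ++ pvLabelsOf b (g + a.length) := by
  intro a
  induction a with
  | nil => intro b g; simp [pvLabelsOf]
  | cons s ss ih =>
    intro b g
    simp only [List.cons_append, pvLabelsOf, ih, List.length_cons, List.append_assoc]
    congr 3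
    push_cast; ring

-- ===== B-side pass 1: the cut fold = pvCutsOf over the size list =====

lemma pv_cfoldR (M1 M2 : Int) : ∀ (R : List (List (Int × Int))) (cs : List Int) (t : Int),
    R.foldl (pvCutStepR M1 M2) (cs, t)
      = (cs ++ pvCutsOf (R.map (pvSzR M1 M2)) t, t + ((R.map (pvSzR M1 M2)).sum : Int)) := by
  intro R
  induction R with
  | nil => intro cs t; simp [pvCutsOf]
  | cons i rest ih =>
    intro cs t
    rw [List.foldl_cons, ih]
    simp only [pvCutStepR, pvSzR, pvCutsOf, List.map_cons, List.sum_cons, Prod.mk.injEq,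
      ← Int.ofNat_toNat]
    split_ifs with h <;> refine ⟨?_, by push_cast; ring⟩ <;> push_cast <;>
      rw [List.append_assoc, List.singleton_append] <;> ring_nf

lemma pv_cfoldL (M1 M2 : Int) : ∀ (L : List (List (Int × Int))) (cs : List Int) (t : Int),
    L.foldl (pvCutStepL M1 M2) (cs, t)
      = (cs ++ pvCutsOf (L.map (pvSzL M1 M2)) t, t + ((L.map (pvSzL M1 M2)).sum : Int)) := by
  intro L
  induction L with
  | nil => intro cs t; simp [pvCutsOf]
  | cons j rest ih =>
    intro cs t
    rw [List.foldl_cons, ih]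
    simp only [pvCutStepL, pvSzL, pvCutsOf, List.map_cons, List.sum_cons, Prod.mk.injEq,
      ← Int.ofNat_toNat]
    refine ⟨?_, by push_cast; ring⟩
    push_cast
    rw [List.append_assoc, List.singleton_append]
    ring_nf

lemma pv_cutsOf_append : ∀ (a b : List Nat) (t : Int),
    pvCutsOf (a ++ b) t = pvCutsOf a t ++ pvCutsOf b (t + (a.sum : Int)) := by
  intro a
  induction a with
  | nil => intro b t; simp [pvCutsOf]
  | cons s ss ih =>
    intro b t
    simp only [List.cons_append, pvCutsOf, ih, List.sum_cons]
    congr 2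
    push_cast; ring

-- ===== structural facts about pvLabelsOf / pvCutsOf =====

lemma pv_labelsOf_length : ∀ (ss : List Nat) (g : Int), (pvLabelsOf ss g).length = ss.sum := by
  intro ss
  induction ss with
  | nil => intro g; simp [pvLabelsOf]
  | cons s rest ih => intro g; simp [pvLabelsOf, ih]

lemma pv_cutsOf_length : ∀ (ss : List Nat) (t : Int), (pvCutsOf ss t).length = ss.length := by
  intro ss
  induction ss with
  | nil => intro t; simp [pvCutsOf]
  | cons s rest ih => intro t; simp [pvCutsOf, ih]

lemma pv_cutsOf_lb : ∀ (ss : List Nat) (t c : Int), c ∈ pvCutsOf ss t → t ≤ c := by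
  intro ss
  induction ss with
  | nil => intro t c h; simp [pvCutsOf] at h
  | cons s rest ih =>
    intro t c h
    simp only [pvCutsOf, List.mem_cons] at h
    rcases h with rfl | h
    · omega
    · have := ih (t + s) c h; omega

-- sorted characterization: an entry is ≤ k iff its index is below the count of entries ≤ k
lemma pv_cutsOf_char : ∀ (ss : List Nat) (t k : Int) (i : Nat), i < ss.length →
    ((pvCutsOf ss t).getD i 0 ≤ k ↔ i < (pvCutsOf ss t).countP (fun c => decide (c ≤ k))) := by
  intro ss
  induction ss with
  | nil => intro t k i h; simp at h
  | cons s rest ih =>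
    intro t k i h
    simp only [pvCutsOf, List.countP_cons]
    by_cases hc : t + (s : Int) ≤ k
    · simp only [decide_eq_true_eq, hc, if_true]
      match i with
      | 0 =>
        simp only [List.getD_cons_zero]
        constructor
        · intro _; omega
        · intro _; exact hc
      | Nat.succ n =>
        simp only [List.getD_cons_succ]
        rw [ih (t + s) k n (by simpa using h)]
        omega
    · have hz : (pvCutsOf rest (t + (s:Int))).countP (fun c => decide (c ≤ k)) = 0 := by
        rw [List.countP_eq_zero]
        intro c hmem
        have := pv_cutsOf_lb rest (t + s) c hmem
        simp only [decide_eq_true_eq]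
        omega
      simp only [decide_eq_true_eq, hc, if_false, hz]
      match i with
      | 0 =>
        simp only [List.getD_cons_zero]
        constructor
        · intro h'; omega
        · intro h'; omega
      | Nat.succ n =>
        simp only [List.getD_cons_succ]
        constructor
        · intro h'
          exfalso
          have hn : n < rest.length := by simpa using h
          have hmem : (pvCutsOf rest (t + (s:Int))).getD n 0 ∈ pvCutsOf rest (t + (s:Int)) := by
            rw [List.getD_eq_getElem _ _ (by rw [pv_cutsOf_length]; exact hn)]
            exact List.getElem_mem _
          have := pv_cutsOf_lb rest (t + s) _ hmem
          omega
        · intro h'; omega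

-- binary search returns the (unique) prefix count r characterized above
lemma pv_bsearch_eq (cuts : List Int) (k : Int) (r : Nat)
    (hr : r ≤ cuts.length)
    (hchar : ∀ i : Nat, i < cuts.length → (cuts.getD i 0 ≤ k ↔ i < r)) :
    ∀ (fuel lo hi : Nat), hi - lo ≤ fuel → lo ≤ r → r ≤ hi → hi ≤ cuts.length →
      pvBsearch cuts k lo hi = r := by
  intro fuel
  induction fuel with
  | zero =>
    intro lo hi hf h1 h2 h3
    have : lo = hi := by omega
    subst this
    rw [pvBsearch, dif_neg (lt_irrefl _)]
    omega
  | succ n ih =>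
    intro lo hi hf h1 h2 h3
    rw [pvBsearch]
    by_cases hlt : lo < hi
    · simp only [hlt, dif_pos]
      have hmid : (lo + hi) / 2 < cuts.length := by omega
      have hget : PySem.List.pyGetD cuts (((lo + hi) / 2 : Nat) : Int) 0
          = cuts.getD ((lo + hi) / 2) 0 := PySem.List.pyGetD_natCast cuts _ 0
      by_cases hcmp : cuts.getD ((lo + hi) / 2) 0 ≤ k
      · have hmr : (lo + hi) / 2 < r := (hchar _ hmid).mp hcmp
        rw [hget]
        simp only [hcmp, if_pos]
        exact ih ((lo + hi) / 2 + 1) hi (by omega) (by omega) h2 h3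
      · have hmr : ¬ ((lo + hi) / 2 < r) := fun hx => hcmp ((hchar _ hmid).mpr hx)
        rw [hget]
        simp only [hcmp, if_neg]
        exact ih lo ((lo + hi) / 2) (by omega) h1 (by omega) (by omega)
    · rw [dif_neg hlt]
      omega

-- pointwise value of the flat label list via the boundary count
lemma pv_labels_getD : ∀ (ss : List Nat) (g t0 k : Int), t0 ≤ k → k < t0 + (ss.sum : Int) →
    (pvLabelsOf ss g).getD (k - t0).toNat 0
      = g + ((pvCutsOf ss t0).countP (fun c => decide (c ≤ k)) : Int) := by
  intro ss
  induction ss with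
  | nil => intro g t0 k h1 h2; simp at h1 h2; omega
  | cons s rest ih =>
    intro g t0 k h1 h2
    simp only [pvLabelsOf, pvCutsOf, List.countP_cons, List.sum_cons] at h2 ⊢
    by_cases hc : t0 + (s : Int) ≤ k
    · -- k lands past this block: recurse into the tail
      have hidx : s ≤ (k - t0).toNat := by omega
      rw [List.getD_append_right _ _ _ _ (by simpa using hidx)]
      simp only [List.length_replicate]
      have : (k - t0).toNat - s = (k - (t0 + s)).toNat := by omega
      rw [this, ih (g + 1) (t0 + s) k (by omega) (by push_cast at h2 ⊢; omega)]
      simp only [decide_eq_true_eq, hc, if_true]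
      push_cast; ring
    · -- k lands in this block: label is g, and no boundary is ≤ k
      have hidx : (k - t0).toNat < s := by omega
      rw [List.getD_append _ _ _ _ (by simpa using hidx)]
      rw [List.getD_replicate _ hidx]
      have hz : (pvCutsOf rest (t0 + (s:Int))).countP (fun c => decide (c ≤ k)) = 0 := by
        rw [List.countP_eq_zero]
        intro c hmem
        have := pv_cutsOf_lb rest (t0 + s) c hmem
        simp only [decide_eq_true_eq]
        omega
      simp only [decide_eq_true_eq, hc, if_false, hz]
      omega

-- ===== VERDICT (by name: the statement is the Claim_ definition above) =====
theorem adj_matrix_spec : Claim_equal_adj_matrix := by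
  intro M1 M2 R L _ _
  unfold Spec_adj_matrix adj_matrix adj_matrix_alt
  -- the ghost flat label list and size list
  set sizes : List Nat := R.map (pvSzR M1 M2) ++ L.map (pvSzL M1 M2) with hsizes
  -- A's dict = enumerate of the ghost fold's label list
  have hA := pv_fold (pvAstepR M1 M2) (pvGstepR M1 M2) (pv_stepR M1 M2) R
      (PySem.Dict.empty, 0) ([], 0) rfl rfl
  have hA2 := pv_fold (pvAstepL M1 M2) (pvGstepL M1 M2) (pv_stepL M1 M2) L _ _ hA.1 hA.2
  -- the ghost fold's label list is pvLabelsOf sizes 0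
  have hGR := pv_gfoldR M1 M2 R [] 0
  have hGL := pv_gfoldL M1 M2 L (pvLabelsOf (R.map (pvSzR M1 M2)) 0) ((0 : Int) + R.length)
  have hG : (L.foldl (pvGstepL M1 M2) (R.foldl (pvGstepR M1 M2) ([], 0))).1
      = pvLabelsOf sizes 0 := by
    rw [hGR]
    simp only [List.nil_append] at hGL ⊢
    rw [hGL, hsizes, pv_labelsOf_append]
    simp
  -- B's pass 1 produces pvCutsOf sizes 0 and the total number of cells
  have hCR := pv_cfoldR M1 M2 R [] 0
  have hCL := pv_cfoldL M1 M2 L (pvCutsOf (R.map (pvSzR M1 M2)) 0)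
      ((0 : Int) + ((R.map (pvSzR M1 M2)).sum : Int))
  have hC : L.foldl (pvCutStepL M1 M2) (R.foldl (pvCutStepR M1 M2) ([], 0))
      = (pvCutsOf sizes 0, (sizes.sum : Int)) := by
    rw [hCR]
    simp only [List.nil_append] at hCL ⊢
    rw [hCL, hsizes, pv_cutsOf_append]
    simp only [Prod.mk.injEq]
    constructor
    · simp
    · simp only [List.sum_append]
      push_cast; ring
  rw [hA2.1, hG, hC]
  -- both sides are now maps over pyRange 0 (sizes.sum)
  rw [PySem.List.enumerate_eq_map_pyRange (pvLabelsOf sizes 0) 0]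
  have hlen : PySem.List.len (pvLabelsOf sizes 0) = ((sizes.sum : Nat) : Int) := by
    simp [pv_labelsOf_length]
  rw [hlen]
  apply List.map_congr_left
  intro k hk
  have hk' := PySem.List.mem_pyRange_one.mp hk
  congr 1
  -- value at index k: flat label = binary-search result
  have hget : PySem.List.pyGetD (pvLabelsOf sizes 0) k 0
      = (pvLabelsOf sizes 0).getD k.toNat 0 := by
    have : k = ((k.toNat : Nat) : Int) := by omega
    rw [this, PySem.List.pyGetD_natCast]
    congr 1
  rw [hget]
  set r : Nat := (pvCutsOf sizes 0).countP (fun c => decide (c ≤ k)) with hr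
  have hbs : pvBsearch (pvCutsOf sizes 0) k 0 (pvCutsOf sizes 0).length = r := by
    apply pv_bsearch_eq (pvCutsOf sizes 0) k r List.countP_le_length
      (fun i hi => pv_cutsOf_char sizes 0 k i (by rwa [pv_cutsOf_length] at hi))
      (pvCutsOf sizes 0).length 0 (pvCutsOf sizes 0).length (by omega) (by omega)
      List.countP_le_length (by omega)
  rw [hbs]
  have := pv_labels_getD sizes 0 0 k (by omega) (by omega)
  simp only [Int.sub_zero] at this
  rw [this]
  omega
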